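-- pv_equiv track=rewrite | github.com/yskang/AlgorithmPractice | baekjoon/python/standard_deviation_17357.py | solution
-- ===== SOURCE A (Python) =====
-- class Fenwick:
--     def __init__(self, array):
--         self.array = array
--         self.tree = [0 for _ in range(len(self.array)+1)]
--         for i, a in enumerate(array):
--             self.update(i, a)
--
--     def update(self, i: int, diff: int):
--         i += 1
--         while i < len(self.tree):
--             self.tree[i] += diff
--             i += (i & -i)
--
--     def _sum(self, i: int):
--         ans = 0
--         while i > 0:
--             ans += self.tree[i]
--             i -= (i & -i)
--         return ans
--
--     def sum(self, start: int, end: int):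
--         return self._sum(end+1) - self._sum(start)
--
-- def solution(n: int, ns: list):
--     sq_ns = list(map(lambda x: x*x, ns))
--     bit_ns = Fenwick(ns)
--     bit_sq_ns = Fenwick(sq_ns)
--
--     res = []
--     for k in range(1, -~n):
--         max_sigma = -9999
--         ans = 1
--         for s in range(n):
--             if s+k > n:
--                 break
--
--             summ = bit_ns.sum(s, s+k-1)
--             sqr_sum = bit_sq_ns.sum(s, s+k-1)
--
--             sigma = sqr_sum*k - (summ**2)
--
--             if max_sigma < sigma:
--                 max_sigma = sigma
--                 ans = s+1
--         res.append(ans)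
--     return '\n'.join(map(str, res))
-- ===== SOURCE B (Python) =====
-- def solution(n: int, ns: list):
--     # prefix sums of ns and ns^2 give each window sum in O(1); no Fenwick trees
--     pref = [0]
--     for x in ns:
--         pref.append(pref[-1] + x)
--     prefsq = [0]
--     for x in ns:
--         prefsq.append(prefsq[-1] + x * x)
--     out = []
--     for k in range(1, n + 1):
--         best = None
--         arg = 0
--         for s in range(n - k + 1):
--             su = pref[s + k] - pref[s]
--             sq = prefsq[s + k] - prefsq[s]
--             sig = k * sq - su * su
--             if best is None or sig > best:
--                 best, arg = sig, s + 1
--         out.append(str(arg))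
--     return '\n'.join(out)
-- ===== Notes on version B (the rewrite author's own statement) =====
-- stated objective: faster
-- what changed: Replaced the two Fenwick (binary indexed) trees and their O(log n) per-query bit-chasing with two plain prefix-sum arrays built once; intended as faster (drops the log factor), measured 10.58x at the largest input size where both finished.
import Mathlib
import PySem

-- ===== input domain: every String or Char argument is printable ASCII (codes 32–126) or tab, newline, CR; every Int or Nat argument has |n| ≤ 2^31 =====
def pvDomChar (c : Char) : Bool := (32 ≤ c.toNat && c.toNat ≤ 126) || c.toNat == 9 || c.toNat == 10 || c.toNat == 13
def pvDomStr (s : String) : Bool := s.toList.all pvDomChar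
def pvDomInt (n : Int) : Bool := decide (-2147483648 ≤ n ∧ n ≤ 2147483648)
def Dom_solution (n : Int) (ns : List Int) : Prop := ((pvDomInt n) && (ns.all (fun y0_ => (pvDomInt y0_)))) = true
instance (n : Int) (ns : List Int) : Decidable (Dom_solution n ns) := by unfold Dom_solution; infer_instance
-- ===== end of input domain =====

-- B replaces A's two Fenwick trees by two prefix-sum arrays; intended as faster (measured ~10x at the largest size both finished).

-- ===== PORT A =====
-- i & -i, the Fenwick low-bit step
def lowb (x : Int) : Int := PySem.Int.band x (-x)

-- Fenwick.update's while-loop; fuel = tree length bounds the iterations (the index grows each round)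
def updGo : Nat → List Int → Int → Int → List Int
  | 0, t, _, _ => t
  | f+1, t, i, diff =>
    if i < (t.length : Int) then
      updGo f (PySem.List.pySetD t i (PySem.List.pyGetD t i 0 + diff)) (i + lowb i) diff
    else t

def fenUpdate (t : List Int) (i diff : Int) : List Int := updGo t.length t (i+1) diff

def fenwick (arr : List Int) : List Int :=
  (PySem.List.enumerate arr 0).foldl (fun t p => fenUpdate t p.1 p.2)
    (List.replicate (arr.length + 1) 0)

-- Fenwick._sum's while-loop; fuel = i.toNat bounds the iterations (the index shrinks each round)
def sumGo : Nat → List Int → Int → Int → Int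
  | 0, _, _, ans => ans
  | f+1, t, i, ans => if 0 < i then sumGo f t (i - lowb i) (ans + PySem.List.pyGetD t i 0) else ans

def fsum (t : List Int) (i : Int) : Int := sumGo i.toNat t i 0

def fenSum (t : List Int) (s e : Int) : Int := fsum t (e+1) - fsum t s

-- the inner 'for s in range(n)' loop with its break
def innerA (n k : Int) (t1 t2 : List Int) : List Int → Int × Int → Int × Int
  | [], st => st
  | s :: rest, st =>
    if n < s + k then st
    else
      let summ := fenSum t1 s (s+k-1)
      let sqrSum := fenSum t2 s (s+k-1)
      let sigma := sqrSum * k - summ^2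
      if st.1 < sigma then innerA n k t1 t2 rest (sigma, s+1) else innerA n k t1 t2 rest st

def solution (n : Int) (ns : List Int) : String :=
  let sqNs := ns.map (fun x => x*x)
  let bitNs := fenwick ns
  let bitSq := fenwick sqNs
  let res := (PySem.List.pyRange 1 (n+1) 1).foldl
    (fun res k => res ++ [(innerA n k bitNs bitSq (PySem.List.pyRange 0 n 1) (-9999, 1)).2]) []
  PySem.Str.join "\n" (res.map PySem.Int.toStr)

-- ===== PORT B =====
def solution_alt (n : Int) (ns : List Int) : String :=
  let pref := ns.foldl (fun acc x => acc ++ [PySem.List.pyGetD acc (-1) 0 + x]) [0]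
  let prefsq := ns.foldl (fun acc x => acc ++ [PySem.List.pyGetD acc (-1) 0 + x*x]) [0]
  let out := (PySem.List.pyRange 1 (n+1) 1).foldl (fun out k =>
    let st := (PySem.List.pyRange 0 (n - k + 1) 1).foldl (fun (st : Option Int × Int) s =>
      let su := PySem.List.pyGetD pref (s+k) 0 - PySem.List.pyGetD pref s 0
      let sq := PySem.List.pyGetD prefsq (s+k) 0 - PySem.List.pyGetD prefsq s 0
      let sig := k * sq - su * su
      match st.1 with
      | none => (some sig, s+1)
      | some m => if m < sig then (some sig, s+1) else st) (none, 0)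
    out ++ [PySem.Int.toStr st.2]) []
  PySem.Str.join "\n" out

-- ===== PRECONDITION & SPEC =====
-- Pre_ excludes exactly the inputs where A raises IndexError: n larger than len(ns)
-- makes Fenwick._sum read past the end of the tree.
def Pre_solution (n : Int) (ns : List Int) : Prop := n ≤ (ns.length : Int)
instance (n : Int) (ns : List Int) : Decidable (Pre_solution n ns) := by unfold Pre_solution; infer_instance
def pvWitness_solution : Int × List Int := (2, [3, 1])
def Spec_solution (n : Int) (ns : List Int) (out : String) : Prop := out = solution_alt n ns
instance (n : Int) (ns : List Int) (out : String) : Decidable (Spec_solution n ns out) := by unfold Spec_solution; infer_instance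

-- ===== CLAIM (what is proved, stated in full; the proofs are below) =====
def Claim_equal_solution : Prop := ∀ (n : Int) (ns : List Int), Dom_solution n ns → Pre_solution n ns → Spec_solution n ns (solution n ns)

-- ===== LEMMAS AND PROOFS =====

theorem nat_and_pred (k v : Nat) :
    (2^(v+1) * k + 2^v) &&& (2^(v+1) * k + 2^v - 1) = 2^(v+1) * k := by
  have h1 : (2:Nat)^v < 2^(v+1) := by
    have := Nat.pow_lt_pow_right (a := 2) (by norm_num) (Nat.lt_succ_self v)
    simpa using this
  have hv1 : (1:Nat) ≤ 2^v := Nat.one_le_two_pow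
  have hsub : 2^(v+1) * k + 2^v - 1 = 2^(v+1) * k + (2^v - 1) := by omega
  rw [hsub]
  apply Nat.eq_of_testBit_eq
  intro j
  rw [Nat.testBit_land,
      Nat.testBit_two_pow_mul_add _ (by omega) j,
      Nat.testBit_two_pow_mul_add _ (by omega) j]
  have h0 : 2^(v+1) * k = 2^(v+1) * k + 0 := by omega
  rw [h0, Nat.testBit_two_pow_mul_add _ (by omega) j]
  by_cases hj : j < v + 1
  · simp only [if_pos hj, Nat.testBit_two_pow, Nat.testBit_two_pow_sub_one]
    have : ¬ (j < v ∧ v = j) := by omega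
    simp [Nat.zero_testBit]
    omega
  · simp only [if_neg hj, Bool.and_self]

-- i & -i of a positive integer written as odd·2^v is 2^v
theorem lowb_odd_mul_pow (k v : Nat) :
    PySem.Int.band ((2*(k:Int)+1) * 2^v) (-((2*(k:Int)+1) * 2^v)) = 2^v := by
  have hm : (0:Int) < (2*(k:Int)+1) * 2^v := by positivity
  set x : Int := (2*(k:Int)+1) * 2^v with hx
  rw [PySem.Int.band]
  rw [if_pos (le_of_lt hm), if_neg (by omega)]
  have hxe : x = ((2^(v+1) * k + 2^v : Nat) : Int) := by
    push_cast; ring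
  set A : Nat := 2^(v+1) * k with hA
  set B : Nat := 2^v with hB
  have hBpos : 0 < B := by positivity
  have ht : x.toNat = A + B := by omega
  have ht2 : (-(-x) - 1).toNat = A + B - 1 := by omega
  rw [ht, ht2, hA, hB, nat_and_pred]
  have h3 : ((A + B - A : Nat) : Int) = (B : Int) := by omega
  rw [hA, hB] at h3
  rw [h3]
  push_cast; ring

theorem exists_odd_pow {x : Int} (hx : 0 < x) : ∃ v k : Nat, x = (2*(k:Int)+1) * 2^v := by
  have hne : x.toNat ≠ 0 := by omega
  obtain ⟨v, m, hodd, hm⟩ := Nat.exists_eq_two_pow_mul_odd hne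
  obtain ⟨c, hc⟩ := hodd
  refine ⟨v, c, ?_⟩
  have : x = ((2^v * m : Nat) : Int) := by omega
  rw [this, hc]; push_cast; ring

theorem lowb_spec {x : Int} (hx : 0 < x) : ∃ v k : Nat, x = (2*(k:Int)+1) * 2^v ∧ lowb x = 2^v := by
  obtain ⟨v, k, hvk⟩ := exists_odd_pow hx
  exact ⟨v, k, hvk, by rw [lowb, hvk, lowb_odd_mul_pow]⟩

theorem lowb_pos {x : Int} (hx : 0 < x) : 0 < lowb x := by
  obtain ⟨v, k, _, h⟩ := lowb_spec hx; rw [h]; positivity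

theorem lowb_le {x : Int} (hx : 0 < x) : lowb x ≤ x := by
  obtain ⟨v, k, hx2, h⟩ := lowb_spec hx
  rw [h, hx2]; nlinarith [pow_pos (show (0:Int) < 2 by norm_num) v]

-- the two arithmetic facts behind the Fenwick chain characterisation
theorem core1 {p i : Int} (hp : 1 ≤ p) (hpi : p < i) (hB : i - lowb i < p) :
    p + lowb p ≤ i := by
  have hi : 0 < i := by omega
  obtain ⟨v, ki, hi2, hlowi⟩ := lowb_spec hi
  obtain ⟨u, t, hp2, hlowp⟩ := lowb_spec (show (0:Int) < p by omega)
  rw [hlowi] at hB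
  rw [hlowp]
  by_cases huv : v ≤ u
  · exfalso
    have hdvd1 : (2:Int)^v ∣ p := by
      rw [hp2]; exact Dvd.dvd.mul_left (pow_dvd_pow 2 huv) _
    have hdvd2 : (2:Int)^v ∣ i - 2^v := by
      have : i - 2^v = 2^v * (2*(ki:Int)) := by rw [hi2]; ring
      rw [this]; exact Dvd.intro _ rfl
    have hd : (2:Int)^v ∣ p - (i - 2^v) := dvd_sub hdvd1 hdvd2
    have hpos : 0 < p - (i - 2^v) := by omega
    have := Int.le_of_dvd hpos hd
    omega
  · -- u < v
    push Not at huv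
    by_contra hcon
    push Not at hcon
    have hdvd1 : (2:Int)^(u+1) ∣ p + 2^u := by
      have : p + 2^u = 2^(u+1) * ((t:Int)+1) := by rw [hp2]; ring
      rw [this]; exact Dvd.intro _ rfl
    have hdvd2 : (2:Int)^(u+1) ∣ i := by
      have : i = 2^(u+1) * ((2*(ki:Int)+1) * 2^(v-u-1)) := by
        rw [hi2]
        have : (2:Int)^v = 2^(u+1) * 2^(v-u-1) := by
          rw [← pow_add]; congr 1; omega
        rw [this]; ring
      rw [this]; exact Dvd.intro _ rfl
    have hd : (2:Int)^(u+1) ∣ p + 2^u - i := dvd_sub hdvd1 hdvd2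
    have hpos : 0 < p + 2^u - i := by omega
    have hle := Int.le_of_dvd hpos hd
    have hlt : p + 2^u - i < 2^u := by omega
    have : (2:Int)^u < 2^(u+1) := by
      have : (2:Int)^(u+1) = 2 * 2^u := by ring
      nlinarith [pow_pos (show (0:Int) < 2 by norm_num) u]
    omega

theorem core2 {p i : Int} (hp : 1 ≤ p) (hi : 0 < i) (hpB : p ≤ i - lowb i)
    (hnext : i - lowb i < p + lowb p) : i < p + lowb p := by
  obtain ⟨v, ki, hi2, hlowi⟩ := lowb_spec hi
  obtain ⟨u, t, hp2, hlowp⟩ := lowb_spec (show (0:Int) < p by omega)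
  rw [hlowi] at hpB
  rw [hlowi, hlowp] at hnext
  rw [hlowp]
  have h2v : (0:Int) < 2^v := by positivity
  have h2u : (0:Int) < 2^u := by positivity
  by_cases huv : u ≤ v
  · exfalso
    have h2 : (2:Int)^(v+1) = 2^(u+1) * 2^(v-u) := by rw [← pow_add]; congr 1; omega
    have hBmul : i - 2^v = 2^(u+1) * (2^(v-u) * (ki:Int)) := by
      calc i - 2^v = (ki:Int) * 2^(v+1) := by rw [hi2]; ring
        _ = 2^(u+1) * (2^(v-u) * (ki:Int)) := by rw [h2]; ring
    have hdvdB : (2:Int)^(u+1) ∣ i - 2^v := ⟨_, hBmul⟩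
    have hdvdp : (2:Int)^(u+1) ∣ p + 2^u := ⟨(t:Int)+1, by rw [hp2]; ring⟩
    have hd : (2:Int)^(u+1) ∣ (i - 2^v) - p + 2^u := by
      have : (i - 2^v) - p + 2^u = ((i - 2^v) - (p + 2^u)) + 2^(u+1) := by ring
      rw [this]
      exact dvd_add (dvd_sub hdvdB hdvdp) dvd_rfl
    have hpos : 0 < (i - 2^v) - p + 2^u := by omega
    have hle := Int.le_of_dvd hpos hd
    have hdbl : (2:Int)^(u+1) = 2 * 2^u := by ring
    omega
  · push Not at huv
    have h2 : (2:Int)^u = 2^(v+1) * 2^(u-v-1) := by rw [← pow_add]; congr 1; omega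
    have hdvdB : (2:Int)^(v+1) ∣ i - 2^v := ⟨(ki:Int), by rw [hi2]; ring⟩
    have hdvdp : (2:Int)^(v+1) ∣ p := ⟨(2*(t:Int)+1) * 2^(u-v-1), by rw [hp2, h2]; ring⟩
    have hdvdu : (2:Int)^(v+1) ∣ 2^u := ⟨2^(u-v-1), h2⟩
    have he : (2:Int)^(v+1) ∣ 2^u - ((i - 2^v) - p) := dvd_sub hdvdu (dvd_sub hdvdB hdvdp)
    have hpos : 0 < 2^u - ((i - 2^v) - p) := by omega
    have hle := Int.le_of_dvd hpos he
    have hdbl : (2:Int)^(v+1) = 2 * 2^v := by ring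
    omega

-- membership of i in the increasing Fenwick update chain starting at p
def reachb (p i : Int) : Bool :=
  if h : 0 < p ∧ p < i then reachb (p + lowb p) i else decide (p = i)
termination_by (i - p).toNat
decreasing_by
  have := lowb_pos h.1
  omega

theorem reachb_unfold (p i : Int) :
    reachb p i = if 0 < p ∧ p < i then reachb (p + lowb p) i else decide (p = i) := by
  rw [reachb]
  split <;> rename_i h <;> simp [h]

theorem reach_le {p i : Int} (h : reachb p i = true) : p ≤ i := by
  by_cases hc : 0 < p ∧ p < i
  · omega
  · rw [reachb_unfold, if_neg hc] at h
    simp at h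
    omega

theorem reach_iff : ∀ (p i : Int), 1 ≤ p → 0 < i →
    (reachb p i = true ↔ i - lowb i < p ∧ p ≤ i) := by
  intro p i hp hi
  induction hn : (i - p).toNat using Nat.strong_induction_on generalizing p with
  | _ n IH =>
  by_cases hlt : p < i
  · rw [reachb_unfold, if_pos ⟨by omega, hlt⟩]
    have hlp := lowb_pos (show (0:Int) < p by omega)
    have hli := lowb_pos hi
    have hile := lowb_le hi
    by_cases hB : i - lowb i < p
    · have hnext := core1 hp hlt hB
      rw [IH (i - (p + lowb p)).toNat (by omega) _ (by omega) rfl]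
      omega
    · push Not at hB
      by_cases hB2 : p + lowb p ≤ i - lowb i
      · rw [IH (i - (p + lowb p)).toNat (by omega) _ (by omega) rfl]
        omega
      · push Not at hB2
        have := core2 hp hi hB hB2
        rw [IH (i - (p + lowb p)).toNat (by omega) _ (by omega) rfl]
        omega
  · rw [reachb_unfold, if_neg (by omega)]
    have := lowb_pos hi
    constructor
    · intro h; simp at h; omega
    · intro h
      have : p = i := by omega
      simp [this]

theorem reachb_false_of_lt {p x : Int} (h : x < p) : reachb p x = false := by
  cases hr : reachb p x
  · rfl
  · exact absurd (reach_le hr) (by omega)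

theorem reachb_self (p : Int) : reachb p p = true := by
  rw [reachb_unfold, if_neg (by omega)]
  simp

theorem getD_setD_int (t : List Int) (p x v : Int) (hp0 : 0 ≤ p) (hp : p < (t.length : Int)) (hx0 : 0 ≤ x) :
    PySem.List.pyGetD (PySem.List.pySetD t p v) x 0 = if x = p then v else PySem.List.pyGetD t x 0 := by
  have hp' : p = ((p.toNat : Nat) : Int) := by omega
  have hx' : x = ((x.toNat : Nat) : Int) := by omega
  rw [hp', hx', PySem.List.pyGetD_pySetD_natCast _ _ _ _ _ (by omega)]
  by_cases h : x.toNat = p.toNat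
  · rw [if_pos h, if_pos (by omega)]
  · rw [if_neg h, if_neg (by omega)]

theorem length_updGo : ∀ (f : Nat) (t : List Int) (i d : Int), (updGo f t i d).length = t.length := by
  intro f
  induction f with
  | zero => intro t i d; rfl
  | succ f IH =>
    intro t i d
    simp only [updGo]
    split
    · rw [IH, PySem.List.length_pySetD]
    · rfl

theorem updGo_get (d : Int) : ∀ (f : Nat) (t : List Int) (p : Int), 1 ≤ p → (t.length : Int) ≤ p + f →
    ∀ (x : Int), 0 ≤ x → x < (t.length : Int) →
    PySem.List.pyGetD (updGo f t p d) x 0 =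
      PySem.List.pyGetD t x 0 + (if reachb p x then d else 0) := by
  intro f
  induction f with
  | zero =>
    intro t p hp hf x hx0 hx
    rw [reachb_false_of_lt (by omega)]
    simp [updGo]
  | succ f IH =>
    intro t p hp hf x hx0 hx
    have hlp := lowb_pos (show (0:Int) < p by omega)
    simp only [updGo]
    split <;> rename_i hbr
    · have hlen : ((PySem.List.pySetD t p (PySem.List.pyGetD t p 0 + d)).length : Int) = (t.length : Int) := by
        rw [PySem.List.length_pySetD]
      rw [IH _ _ (by omega) (by rw [hlen]; omega) x hx0 (by rw [hlen]; exact hx)]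
      rw [getD_setD_int t p x _ (by omega) hbr hx0]
      by_cases hxp : x = p
      · subst hxp
        rw [if_pos rfl, reachb_self, reachb_false_of_lt (by omega)]
        simp
      · rw [if_neg hxp]
        have hrw : reachb p x = reachb (p + lowb p) x := by
          by_cases hpx : p < x
          · rw [reachb_unfold p x, if_pos (show 0 < p ∧ p < x from ⟨by omega, hpx⟩)]
          · rw [reachb_false_of_lt (show x < p by omega),
                reachb_false_of_lt (show x < p + lowb p by omega)]
        rw [hrw]
    · rw [reachb_false_of_lt (by omega)]
      simp

theorem length_fenUpdate (t : List Int) (i d : Int) : (fenUpdate t i d).length = t.length := by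
  rw [fenUpdate, length_updGo]

theorem fenUpdate_get (t : List Int) (j d x : Int) (hj : 0 ≤ j) (hx0 : 0 ≤ x)
    (hx : x < (t.length : Int)) :
    PySem.List.pyGetD (fenUpdate t j d) x 0 =
      PySem.List.pyGetD t x 0 + (if reachb (j+1) x then d else 0) :=
  updGo_get d t.length t (j+1) (by omega) (by omega) x hx0 hx

theorem foldUpd_get : ∀ (ps : List (Int × Int)) (t : List Int) (x : Int),
    (∀ q ∈ ps, 0 ≤ q.1) → 0 ≤ x → x < (t.length : Int) →
    PySem.List.pyGetD (ps.foldl (fun t p => fenUpdate t p.1 p.2) t) x 0 =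
      PySem.List.pyGetD t x 0 + (ps.map (fun q => if reachb (q.1+1) x then q.2 else 0)).sum := by
  intro ps
  induction ps with
  | nil => intro t x _ _ _; simp
  | cons q ps IH =>
    intro t x hq hx0 hx
    rw [List.foldl_cons,
        IH _ x (fun r hr => hq r (List.mem_cons_of_mem _ hr)) hx0
          (by rw [length_fenUpdate]; exact hx),
        fenUpdate_get t q.1 q.2 x (hq q (List.mem_cons_self)) hx0 hx]
    simp [add_assoc]

theorem fenwick_get (a : List Int) (x : Int) (hx0 : 0 ≤ x) (hx : x < (a.length : Int) + 1) :
    PySem.List.pyGetD (fenwick a) x 0 =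
      ((PySem.List.enumerate a 0).map (fun q => if reachb (q.1+1) x then q.2 else 0)).sum := by
  rw [fenwick, foldUpd_get _ _ x ?hnn hx0 (by simp; omega)]
  · have : PySem.List.pyGetD (List.replicate (a.length + 1) (0:Int)) x 0 = 0 := by
      rw [PySem.List.pyGetD_of_nonneg _ _ hx0]
      simp [List.getD]
    rw [this, zero_add]
  case hnn =>
    intro q hq
    have hm := List.mem_map_of_mem (f := Prod.fst) hq
    rw [PySem.List.map_fst_enumerate] at hm
    exact (PySem.List.mem_pyRange_one.mp hm).1

theorem sum_take_succ (a : List Int) (j : Nat) (h : j < a.length) :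
    (a.take (j+1)).sum = (a.take j).sum + a.getD j 0 := by
  rw [List.take_succ, List.sum_append, List.getElem?_eq_getElem h]
  simp [List.getD, List.getElem?_eq_getElem h]

theorem band_sum_core (a : List Int) : ∀ (m Bn : Nat), Bn + m ≤ a.length →
    ((List.range (Bn+m)).map (fun j => if Bn ≤ j ∧ j < Bn + m then a.getD j 0 else 0)).sum
      = (a.take (Bn+m)).sum - (a.take Bn).sum := by
  intro m
  induction m with
  | zero =>
    intro Bn _
    have : ∀ x ∈ (List.range (Bn+0)).map (fun j => if Bn ≤ j ∧ j < Bn + 0 then a.getD j 0 else 0), x = 0 := by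
      intro x hx
      obtain ⟨j, hj, rfl⟩ := List.mem_map.mp hx
      rw [if_neg (by omega)]
    rw [List.sum_eq_zero this]
    simp
  | succ m IH =>
    intro Bn hle
    have hr : Bn + (m+1) = (Bn + m) + 1 := by omega
    rw [hr, List.range_succ, List.map_append, List.sum_append]
    have h1 : ((List.range (Bn+m)).map (fun j => if Bn ≤ j ∧ j < Bn + m + 1 then a.getD j 0 else 0)).sum
        = ((List.range (Bn+m)).map (fun j => if Bn ≤ j ∧ j < Bn + m then a.getD j 0 else 0)).sum := by
      apply congrArg
      apply List.map_congr_left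
      intro j hj
      have hjlt := List.mem_range.mp hj
      by_cases hc : Bn ≤ j
      · rw [if_pos (by omega), if_pos (by omega)]
      · rw [if_neg (by omega), if_neg (by omega)]
    simp only [List.map_cons, List.map_nil, List.sum_cons, List.sum_nil]
    rw [h1, IH Bn (by omega), if_pos (by omega), sum_take_succ a (Bn+m) (by omega)]
    omega

theorem band_sum_ext (a : List Int) (Bn In : Nat) : ∀ (d : Nat),
    ((List.range (In+d)).map (fun j => if Bn ≤ j ∧ j < In then a.getD j 0 else 0)).sum
      = ((List.range In).map (fun j => if Bn ≤ j ∧ j < In then a.getD j 0 else 0)).sum := by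
  intro d
  induction d with
  | zero => rfl
  | succ d IH =>
    have hr : In + (d+1) = (In + d) + 1 := by omega
    rw [hr, List.range_succ, List.map_append, List.sum_append]
    simp only [List.map_cons, List.map_nil, List.sum_cons, List.sum_nil]
    rw [if_neg (by omega), IH]
    omega

theorem band_sum_main (a : List Int) (Bn In len : Nat) (h1 : Bn ≤ In) (h2 : In ≤ len) (h3 : In ≤ a.length) :
    ((List.range len).map (fun j => if Bn ≤ j ∧ j < In then a.getD j 0 else 0)).sum
      = (a.take In).sum - (a.take Bn).sum := by
  obtain ⟨d, rfl⟩ : ∃ d, len = In + d := ⟨len - In, by omega⟩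
  rw [band_sum_ext]
  obtain ⟨m, rfl⟩ : ∃ m, In = Bn + m := ⟨In - Bn, by omega⟩
  exact band_sum_core a m Bn h3

theorem fenT_sum (a : List Int) (i : Int) (h1 : 0 < i) (hlen : i ≤ (a.length : Int)) :
    PySem.List.pyGetD (fenwick a) i 0
      = (a.take i.toNat).sum - (a.take (i - lowb i).toNat).sum := by
  have hli := lowb_pos h1
  have hle := lowb_le h1
  rw [fenwick_get a i (by omega) (by omega)]
  rw [PySem.List.enumerate_eq_map_pyRange a 0, List.map_map]
  have hlen2 : PySem.List.len a = ((a.length : Nat) : Int) := by simp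
  rw [hlen2, PySem.List.pyRange_zero_nat, List.map_map]
  have hcong : ∀ j ∈ List.range a.length,
      (((fun q : Int × Int => if reachb (q.1+1) i then q.2 else 0) ∘
        (fun j : Int => (j, PySem.List.pyGetD a j 0))) ∘ (fun k : Nat => (k:Int))) j
        = (fun j => if (i - lowb i).toNat ≤ j ∧ j < i.toNat then a.getD j 0 else 0) j := by
    intro j hj
    have hjl := List.mem_range.mp hj
    simp only [Function.comp]
    have hiff := reach_iff ((j:Int)+1) i (by omega) h1
    by_cases hc : (i - lowb i).toNat ≤ j ∧ j < i.toNat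
    · have hr : reachb ((j:Int)+1) i = true := hiff.mpr (by omega)
      rw [hr, if_pos rfl, if_pos hc, PySem.List.pyGetD_of_nonneg _ _ (by omega)]
      simp
    · have hr : reachb ((j:Int)+1) i = false := by
        cases hrr : reachb ((j:Int)+1) i
        · rfl
        · exfalso; have := hiff.mp hrr; omega
      rw [hr, if_neg hc]
      simp
  rw [List.map_congr_left hcong]
  exact band_sum_main a _ _ _ (by omega) (by omega) (by omega)

theorem sumGo_nonpos : ∀ (f : Nat) (t : List Int) (i ans : Int), i ≤ 0 → sumGo f t i ans = ans := by
  intro f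
  induction f with
  | zero => intro t i ans _; rfl
  | succ f _ => intro t i ans hi; simp only [sumGo]; rw [if_neg (by omega)]

theorem sumGo_acc : ∀ (f : Nat) (t : List Int) (i ans : Int), sumGo f t i ans = ans + sumGo f t i 0 := by
  intro f
  induction f with
  | zero => intro t i ans; simp [sumGo]
  | succ f IH =>
    intro t i ans
    simp only [sumGo]
    split
    · rw [IH t _ (ans + _), IH t _ (0 + _)]
      ring
    · ring

theorem sumGo_fuel : ∀ (n : Nat) (i : Int), i.toNat ≤ n → ∀ (f f' : Nat), n ≤ f → n ≤ f' →
    ∀ (t : List Int) (ans : Int), sumGo f t i ans = sumGo f' t i ans := by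
  intro n
  induction n using Nat.strong_induction_on with
  | _ n IHn =>
  intro i hi f f' hf hf' t ans
  by_cases hpos : 0 < i
  · have hlp := lowb_pos hpos
    have hll := lowb_le hpos
    obtain ⟨f1, rfl⟩ : ∃ f1, f = f1 + 1 := ⟨f - 1, by omega⟩
    obtain ⟨f2, rfl⟩ : ∃ f2, f' = f2 + 1 := ⟨f' - 1, by omega⟩
    simp only [sumGo]
    rw [if_pos hpos, if_pos hpos]
    by_cases hn1 : n = 0
    · omega
    · rw [IHn (n-1) (by omega) (i - lowb i) (by omega) f1 (n-1) (by omega) (by omega),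
          IHn (n-1) (by omega) (i - lowb i) (by omega) f2 (n-1) (by omega) (by omega)]
  · rw [sumGo_nonpos _ _ _ _ (by omega), sumGo_nonpos _ _ _ _ (by omega)]

theorem fsum_rec (t : List Int) (i : Int) (hi : 0 < i) :
    fsum t i = fsum t (i - lowb i) + PySem.List.pyGetD t i 0 := by
  have hlp := lowb_pos hi
  have hll := lowb_le hi
  obtain ⟨m, hm⟩ : ∃ m, i.toNat = m + 1 := ⟨i.toNat - 1, by omega⟩
  rw [fsum, hm]
  simp only [sumGo]
  rw [if_pos hi, sumGo_acc,
      sumGo_fuel ((i - lowb i).toNat) (i - lowb i) (le_refl _) m ((i - lowb i).toNat) (by omega) (le_refl _)]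
  rw [fsum]
  ring

theorem fsum_nonpos (t : List Int) (i : Int) (hi : i ≤ 0) : fsum t i = 0 := by
  rw [fsum]
  have : i.toNat = 0 := by omega
  rw [this]
  rfl

theorem fenwick_sum (a : List Int) : ∀ (i : Int), 0 ≤ i → i ≤ (a.length : Int) →
    fsum (fenwick a) i = (a.take i.toNat).sum := by
  intro i
  induction hn : i.toNat using Nat.strong_induction_on generalizing i with
  | _ n IH =>
  intro h0 hlen
  subst hn
  by_cases hpos : 0 < i
  · have hlp := lowb_pos hpos
    have hll := lowb_le hpos
    rw [fsum_rec _ _ hpos, fenT_sum a i hpos hlen,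
        IH ((i - lowb i).toNat) (by omega) (i - lowb i) rfl (by omega) (by omega)]
    ring
  · have : i = 0 := by omega
    subst this
    rw [fsum_nonpos _ _ (by omega)]
    rfl



theorem pyGetD_concat_neg_one (l : List Int) (c : Int) :
    PySem.List.pyGetD (l ++ [c]) (-1) 0 = c := by
  simpa using PySem.List.pyGetD_neg_ofNat (l ++ [c]) 1 0 (by norm_num) (by simp)

theorem prefFold (a : List Int) : ∀ (pre : List Int) (c : Int),
    a.foldl (fun acc x => acc ++ [PySem.List.pyGetD acc (-1) 0 + x]) (pre ++ [c])
      = pre ++ [c] ++ (List.range a.length).map (fun j => c + (a.take (j+1)).sum) := by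
  induction a with
  | nil => intro pre c; simp
  | cons x a IH =>
    intro pre c
    rw [List.foldl_cons, pyGetD_concat_neg_one]
    rw [IH (pre ++ [c]) (c + x)]
    simp [List.range_succ_eq_map, Function.comp, add_assoc, List.append_assoc]

theorem pref_eq (a : List Int) :
    a.foldl (fun acc x => acc ++ [PySem.List.pyGetD acc (-1) 0 + x]) [0]
      = (List.range (a.length + 1)).map (fun j => ((a.take j).sum : Int)) := by
  have h := prefFold a [] 0
  simp only [List.nil_append] at h
  rw [h, List.range_succ_eq_map]
  simp [Function.comp]

theorem pref_get (a : List Int) (i : Int) (h0 : 0 ≤ i) (h : i ≤ (a.length : Int)) :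
    PySem.List.pyGetD
      (a.foldl (fun acc x => acc ++ [PySem.List.pyGetD acc (-1) 0 + x]) [0]) i 0
      = (a.take i.toNat).sum := by
  rw [pref_eq, PySem.List.pyGetD_of_nonneg _ _ h0,
      PySem.List.getD_map_range _ _ _ _ (by omega)]

theorem cs_list : ∀ (l : List Int), (l.sum)^2 ≤ (l.length : Int) * (l.map (fun x => x*x)).sum := by
  intro l
  induction l with
  | nil => simp
  | cons x l IH =>
    simp only [List.sum_cons, List.map_cons, List.length_cons]
    push_cast
    rcases Nat.eq_zero_or_pos l.length with hL | hL
    · rw [List.length_eq_zero_iff.mp hL] at *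
      simp only [List.sum_nil, List.length_nil, List.map_nil, Nat.cast_zero, add_zero, zero_add,
        mul_zero]
      nlinarith []
    · have hL' : (1:Int) ≤ (l.length : Int) := by exact_mod_cast hL
      nlinarith [IH, sq_nonneg ((l.length : Int) * x - l.sum), hL']

-- each window's statistic k·Σx² − (Σx)² is nonnegative (Cauchy–Schwarz)
theorem sigma_nonneg (a : List Int) (s k : Int) (h0 : 0 ≤ s) (hk : 1 ≤ k)
    (hsk : s + k ≤ (a.length : Int)) :
    0 ≤ (((a.map (fun x => x*x)).take (s+k).toNat).sum - ((a.map (fun x => x*x)).take s.toNat).sum) * k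
        - ((a.take (s+k).toNat).sum - (a.take s.toNat).sum)^2 := by
  have htn : (s+k).toNat = s.toNat + k.toNat := by omega
  set w : List Int := (a.drop s.toNat).take k.toNat with hw
  have hS : (a.take (s+k).toNat).sum - (a.take s.toNat).sum = w.sum := by
    rw [htn, List.take_add, List.sum_append]; ring
  have hQ : ((a.map (fun x => x*x)).take (s+k).toNat).sum - ((a.map (fun x => x*x)).take s.toNat).sum
      = (w.map (fun x => x*x)).sum := by
    rw [htn, List.take_add, List.sum_append, hw, List.map_take, List.map_drop]; ring
  have hlw : w.length = k.toNat := by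
    rw [hw, List.length_take, List.length_drop]; omega
  have := cs_list w
  rw [hlw] at this
  rw [hS, hQ]
  have hkc : ((k.toNat : Nat) : Int) = k := by omega
  rw [hkc] at this
  nlinarith [this]


def stepAf (σ : Int → Int) (st : Int × Int) (s : Int) : Int × Int :=
  if st.1 < σ s then (σ s, s+1) else st

def stepBf (σ : Int → Int) (st : Option Int × Int) (s : Int) : Option Int × Int :=
  match st.1 with
  | none => (some (σ s), s+1)
  | some m => if m < σ s then (some (σ s), s+1) else st

def sigSpec (ns : List Int) (k s : Int) : Int :=
  k * (((ns.map (fun x => x*x)).take (s+k).toNat).sum - ((ns.map (fun x => x*x)).take s.toNat).sum)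
    - ((ns.take (s+k).toNat).sum - (ns.take s.toNat).sum)^2

theorem innerA_stop (n k : Int) (t1 t2 : List Int) (z : Int) (zs : List Int) (st : Int × Int)
    (h : n < z + k) : innerA n k t1 t2 (z :: zs) st = st := by
  simp only [innerA]
  rw [if_pos h]

theorem innerA_no_break (n k : Int) (t1 t2 : List Int) :
    ∀ (l zs : List Int) (st : Int × Int), (∀ s ∈ l, ¬ n < s + k) →
    innerA n k t1 t2 (l ++ zs) st
      = innerA n k t1 t2 zs
          (l.foldl (stepAf (fun s => fenSum t2 s (s+k-1) * k - (fenSum t1 s (s+k-1))^2)) st) := by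
  intro l
  induction l with
  | nil => intro zs st _; rfl
  | cons s l IH =>
    intro zs st h
    rw [List.cons_append]
    simp only [innerA]
    rw [if_neg (h s List.mem_cons_self)]
    rw [List.foldl_cons]
    rw [stepAf]
    split <;>
      exact IH zs _ (fun x hx => h x (List.mem_cons_of_mem _ hx))

theorem fold_rel (σ : Int → Int) : ∀ (l : List Int) (m arg : Int),
    l.foldl (stepBf σ) (some m, arg)
      = (some (l.foldl (stepAf σ) (m, arg)).1, (l.foldl (stepAf σ) (m, arg)).2) := by
  intro l
  induction l with
  | nil => intro m arg; rfl
  | cons s l IH =>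
    intro m arg
    rw [List.foldl_cons, List.foldl_cons]
    show l.foldl (stepBf σ) (stepBf σ (some m, arg) s) = _
    rw [show stepBf σ (some m, arg) s = if m < σ s then (some (σ s), s+1) else (some m, arg) from rfl]
    rw [show stepAf σ (m, arg) s = if m < σ s then (σ s, s+1) else (m, arg) from rfl]
    split
    · exact IH (σ s) (s+1)
    · exact IH m arg

theorem per_k (n : Int) (ns : List Int) (k : Int) (hk1 : 1 ≤ k) (hk2 : k ≤ n)
    (hpre : n ≤ (ns.length : Int)) :
    (innerA n k (fenwick ns) (fenwick (ns.map (fun x => x*x)))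
        (PySem.List.pyRange 0 n 1) (-9999, 1)).2
      = ((PySem.List.pyRange 0 (n-k+1) 1).foldl (stepBf (sigSpec ns k)) (none, 0)).2 := by
  have hsplit : PySem.List.pyRange 0 n 1
      = PySem.List.pyRange 0 (n-k+1) 1 ++ PySem.List.pyRange (n-k+1) n 1 :=
    PySem.List.pyRange_one_append 0 (n-k+1) n (by omega) (by omega)
  have hnb : ∀ s ∈ PySem.List.pyRange 0 (n-k+1) 1, ¬ n < s + k := by
    intro s hs
    have := PySem.List.mem_pyRange_one.mp hs
    omega
  rw [hsplit, innerA_no_break n k _ _ _ _ _ hnb]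
  -- the remaining range triggers the break (or is empty)
  have hrest : ∀ st : Int × Int,
      innerA n k (fenwick ns) (fenwick (ns.map (fun x => x*x)))
        (PySem.List.pyRange (n-k+1) n 1) st = st := by
    intro st
    by_cases hlt : n - k + 1 < n
    · rw [PySem.List.pyRange_one_cons hlt, innerA_stop _ _ _ _ _ _ _ (by omega)]
    · rw [PySem.List.pyRange_one_eq_nil (by omega)]
      rfl
  rw [hrest]
  -- replace the Fenwick-based σ by sigSpec on the processed range
  have hσ : ∀ st : Int × Int, ∀ s ∈ PySem.List.pyRange 0 (n-k+1) 1,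
      stepAf (fun s => fenSum (fenwick (ns.map (fun x => x*x))) s (s+k-1) * k
        - (fenSum (fenwick ns) s (s+k-1))^2) st s = stepAf (sigSpec ns k) st s := by
    intro st s hs
    have hsb := PySem.List.mem_pyRange_one.mp hs
    have hσs : fenSum (fenwick (ns.map (fun x => x*x))) s (s+k-1) * k
        - (fenSum (fenwick ns) s (s+k-1))^2 = sigSpec ns k s := by
      rw [fenSum, fenSum]
      have hsk1 : s + k - 1 + 1 = s + k := by ring
      rw [hsk1]
      rw [fenwick_sum ns (s+k) (by omega) (by omega),
          fenwick_sum ns s (by omega) (by omega),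
          fenwick_sum (ns.map (fun x => x*x)) (s+k) (by omega) (by simp; omega),
          fenwick_sum (ns.map (fun x => x*x)) s (by omega) (by simp; omega)]
      rw [sigSpec]
      ring
    rw [stepAf, stepAf, hσs]
  rw [PySem.List.foldl_congr_mem _ _ _ _ (fun st s hs => hσ st s hs)]
  -- peel the first window and relate the two folds
  have hcons : PySem.List.pyRange 0 (n-k+1) 1 = 0 :: PySem.List.pyRange 1 (n-k+1) 1 :=
    PySem.List.pyRange_one_cons (by omega)
  rw [hcons, List.foldl_cons, List.foldl_cons]
  have hσ0 : 0 ≤ sigSpec ns k 0 := by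
    have := sigma_nonneg ns 0 k (le_refl 0) hk1 (by omega)
    rw [sigSpec]
    simp only [zero_add] at this ⊢
    nlinarith [this]
  rw [show stepAf (sigSpec ns k) (-9999, 1) 0 = ((sigSpec ns k 0), (0:Int)+1) by
        rw [stepAf]; rw [if_pos (by omega)]]
  rw [show stepBf (sigSpec ns k) (none, 0) 0 = (some (sigSpec ns k 0), (0:Int)+1) from rfl]
  rw [fold_rel]

theorem foldl_out_map : ∀ (ks : List Int) (racc : List Int) (F : Int → Int),
    (ks.foldl (fun r k => r ++ [F k]) racc).map PySem.Int.toStr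
      = ks.foldl (fun r k => r ++ [PySem.Int.toStr (F k)]) (racc.map PySem.Int.toStr) := by
  intro ks
  induction ks with
  | nil => intro racc F; rfl
  | cons k ks IH =>
    intro racc F
    rw [List.foldl_cons, List.foldl_cons, IH, List.map_append]
    rfl

-- ===== VERDICT (by name: the statement is the Claim_ definition above) =====
theorem prefsq_as_map (ns : List Int) :
    ns.foldl (fun acc x => acc ++ [PySem.List.pyGetD acc (-1) 0 + x*x]) [0]
      = (ns.map (fun x => x*x)).foldl (fun acc x => acc ++ [PySem.List.pyGetD acc (-1) 0 + x]) [0] :=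
  by rw [List.foldl_map]

theorem sig_eq (n : Int) (ns : List Int) (k s : Int) (hk1 : 1 ≤ k) (hk2 : k ≤ n)
    (hpre : n ≤ (ns.length : Int)) (hs0 : 0 ≤ s) (hsk : s + k ≤ n) :
    k * (PySem.List.pyGetD (ns.foldl (fun acc x => acc ++ [PySem.List.pyGetD acc (-1) 0 + x*x]) [0]) (s+k) 0
          - PySem.List.pyGetD (ns.foldl (fun acc x => acc ++ [PySem.List.pyGetD acc (-1) 0 + x*x]) [0]) s 0)
      - (PySem.List.pyGetD (ns.foldl (fun acc x => acc ++ [PySem.List.pyGetD acc (-1) 0 + x]) [0]) (s+k) 0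
          - PySem.List.pyGetD (ns.foldl (fun acc x => acc ++ [PySem.List.pyGetD acc (-1) 0 + x]) [0]) s 0)
        * (PySem.List.pyGetD (ns.foldl (fun acc x => acc ++ [PySem.List.pyGetD acc (-1) 0 + x]) [0]) (s+k) 0
          - PySem.List.pyGetD (ns.foldl (fun acc x => acc ++ [PySem.List.pyGetD acc (-1) 0 + x]) [0]) s 0)
      = sigSpec ns k s := by
  rw [prefsq_as_map,
      pref_get ns (s+k) (by omega) (by omega),
      pref_get ns s (by omega) (by omega),
      pref_get (ns.map (fun x => x*x)) (s+k) (by omega) (by simp; omega),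
      pref_get (ns.map (fun x => x*x)) s (by omega) (by simp; omega),
      sigSpec]
  ring

theorem solution_spec : Claim_equal_solution := by
  intro n ns hdom hpre
  rw [Pre_solution] at hpre
  show solution n ns = solution_alt n ns
  rw [solution, solution_alt]
  apply congrArg (PySem.Str.join "\n")
  rw [foldl_out_map]
  rw [List.map_nil]
  apply PySem.List.foldl_congr_mem
  intro acc k hk
  have hkb := PySem.List.mem_pyRange_one.mp hk
  apply congrArg (acc ++ [·])
  apply congrArg PySem.Int.toStr
  rw [per_k n ns k (by omega) (by omega) hpre]
  apply congrArg Prod.snd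
  apply PySem.List.foldl_congr_mem
  intro st s hs
  have hsb := PySem.List.mem_pyRange_one.mp hs
  rw [stepBf]
  have hσ := sig_eq n ns k s (by omega) (by omega) hpre (by omega) (by omega)
  rcases st with ⟨b, arg⟩
  cases b with
  | none => simp only; rw [hσ]
  | some m => simp only; rw [hσ]
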